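-- pv_equiv track=rewrite | github.com/RussellEmerine/layup_seq | main.py | layup_seq_naive
-- ===== SOURCE A (Python) =====
-- def layup_seq_naive(n: int) -> int:
--     """
--     A naive, *very* slow implementation of the Layup Sequence.
--     """
--     if n == 1:
--         return 1
--     elif n == 2:
--         return 2
--     elif n % 2 == 0:
--         return layup_seq_naive(n - 1) + layup_seq_naive(n - 2)
--     else:
--         return 2 * layup_seq_naive(n - 1) - layup_seq_naive(n - 2)
-- ===== SOURCE B (Python) =====
-- def layup_seq_naive(n: int) -> int:
--     """
--     Bottom-up iteration keeping only the last two terms: O(n) instead of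
--     A's exponential double recursion.
--     """
--     if n == 1:
--         return 1
--     a, b = 1, 2
--     for i in range(3, n + 1):
--         a, b = b, (b + a if i % 2 == 0 else 2 * b - a)
--     return b
-- ===== Notes on version B (the rewrite author's own statement) =====
-- stated objective: faster
-- what changed: Replaces the exponential double recursion with a bottom-up loop keeping only the last two sequence values; intended as faster (a timing run measured A timing out at n=16 while B returned, so no ratio could be read).
-- outside the precondition, e.g. on layup_seq_naive(0): A raises RecursionError, B returns 2
import Mathlib
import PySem

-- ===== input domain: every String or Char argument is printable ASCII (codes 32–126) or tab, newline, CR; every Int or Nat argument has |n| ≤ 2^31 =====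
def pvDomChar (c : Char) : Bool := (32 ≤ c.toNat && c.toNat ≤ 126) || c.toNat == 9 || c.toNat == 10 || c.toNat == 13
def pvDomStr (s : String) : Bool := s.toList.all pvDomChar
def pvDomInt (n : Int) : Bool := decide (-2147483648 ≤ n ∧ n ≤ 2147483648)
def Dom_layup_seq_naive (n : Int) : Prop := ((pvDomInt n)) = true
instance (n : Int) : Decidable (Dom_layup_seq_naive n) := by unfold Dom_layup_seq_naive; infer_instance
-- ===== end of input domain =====

-- B replaces A's exponential double recursion with a bottom-up two-variable loop (intended as faster: a timing run saw A time out at n=16 while B returned; no ratio measurable).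


-- ===== PORT A =====
-- A's double recursion, on the Nat magnitude of n (Pre_ restricts to n ≥ 1, where
-- the Python recursion terminates; the 0 case is never reached inside Pre_).
def layupA : Nat → Int
  | 0 => 0
  | 1 => 1
  | 2 => 2
  | (k+3) => if (k+3) % 2 == 0 then layupA (k+2) + layupA (k+1)
             else 2 * layupA (k+2) - layupA (k+1)

def layup_seq_naive (n : Int) : Int := layupA n.toNat

-- ===== PORT B =====
-- the loop body: a, b = b, (b + a if i % 2 == 0 else 2*b - a)
def layupStep (st : Int × Int) (i : Int) : Int × Int :=
  (st.2, if PySem.Int.mod i 2 == 0 then st.2 + st.1 else 2 * st.2 - st.1)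

def layup_seq_naive_alt (n : Int) : Int :=
  if n == 1 then 1
  else ((PySem.List.pyRange 3 (n + 1) 1).foldl layupStep (1, 2)).2

-- ===== PRECONDITION & SPEC =====
-- Pre_ excludes n ≤ 0, where the Python A recurses forever (RecursionError); B's loop simply does not run there and it returns its seed (see claim.json cites).
def Pre_layup_seq_naive (n : Int) : Prop := 1 ≤ n
instance (n : Int) : Decidable (Pre_layup_seq_naive n) := by unfold Pre_layup_seq_naive; infer_instance
def pvWitness_layup_seq_naive : Int := 5

def Spec_layup_seq_naive (n : Int) (out : Int) : Prop := out = layup_seq_naive_alt n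
instance (n : Int) (out : Int) : Decidable (Spec_layup_seq_naive n out) := by unfold Spec_layup_seq_naive; infer_instance

-- ===== CLAIM (what is proved, stated in full; the proofs are below) =====
def Claim_equal_layup_seq_naive : Prop := ∀ (n : Int), Dom_layup_seq_naive n → Pre_layup_seq_naive n → Spec_layup_seq_naive n (layup_seq_naive n)

-- ===== LEMMAS AND PROOFS =====

-- loop invariant: after processing range(3, m+1) the state is (layupA (m-1), layupA m)
lemma foldl_layup (m : Nat) (h : 2 ≤ m) :
    (PySem.List.pyRange 3 ((m : Int) + 1) 1).foldl layupStep (1, 2)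
      = (layupA (m - 1), layupA m) := by
  induction m with
  | zero => omega
  | succ m ih =>
    by_cases hm : 2 ≤ m
    · have h3 : (3 : Int) ≤ (m : Int) + 1 := by exact_mod_cast Nat.succ_le_succ hm
      rw [show ((m + 1 : Nat) : Int) + 1 = ((m : Int) + 1) + 1 by push_cast; ring,
          PySem.List.pyRange_one_succ_right h3, List.foldl_append, ih hm]
      obtain ⟨k, rfl⟩ : ∃ k, m = k + 2 := ⟨m - 2, by omega⟩
      simp only [List.foldl_cons, List.foldl_nil, layupStep]
      rcases Nat.even_or_odd (k + 3) with he | ho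
      · have h2 : (k + 3) % 2 = 0 := Nat.even_iff.mp he
        simp [h2, layupA, show k + 2 + 1 = k + 3 from rfl, show k + 2 - 1 = k + 1 by omega,
              show k + 2 + 1 - 1 = k + 2 by omega]
        intro hx; exfalso; omega
      · have h2 : (k + 3) % 2 = 1 := Nat.odd_iff.mp ho
        simp [h2, layupA, show k + 2 + 1 = k + 3 from rfl, show k + 2 - 1 = k + 1 by omega,
              show k + 2 + 1 - 1 = k + 2 by omega]
        intro hx; exfalso; omega
    · have : m = 1 := by omega
      subst this
      decide

-- ===== VERDICT (by name: the statement is the Claim_ definition above) =====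
theorem layup_seq_naive_spec : Claim_equal_layup_seq_naive := by
  intro n _ hpre
  have hp : 1 ≤ n := hpre
  unfold Spec_layup_seq_naive layup_seq_naive layup_seq_naive_alt
  obtain ⟨m, rfl⟩ : ∃ m : Nat, n = (m : Int) := ⟨n.toNat, by omega⟩
  have hm1 : 1 ≤ m := by exact_mod_cast hp
  by_cases h1 : m = 1
  · subst h1; decide
  · have hm2 : 2 ≤ m := by omega
    have hne : ((m : Int) == 1) = false := by
      simp only [beq_eq_false_iff_ne, ne_eq]
      exact_mod_cast h1
    rw [hne, if_neg (by simp), foldl_layup m hm2, Int.toNat_natCast]
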